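-- pv_equiv track=rewrite | github.com/shubhamg20/Eureka_maniskill | Eureka/eureka/eureka_maniskill.py | filter_traceback
-- ===== SOURCE A (Python) =====
-- def filter_traceback(stdout_str):
--     """
--     Filters the traceback message from the standard output string.
--
--     Args:
--         stdout_str (str): The standard output string.
--
--     Returns:
--         str: The filtered traceback message.
--     """
--     traceback_msg = ""
--     traceback_start = False
--     lines = stdout_str.split("\n")
--     for line in lines:
--         if "Traceback" in line:
--             traceback_start = True
--         if traceback_start:
--             traceback_msg += line + "\n"
--     return traceback_msg
-- ===== SOURCE B (Python) =====
-- def filter_traceback(stdout_str):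
--     """Locate-then-slice: find the first line containing 'Traceback', then
--     emit everything from it in one join (instead of a boolean-flag loop)."""
--     lines = stdout_str.split("\n")
--     for i, line in enumerate(lines):
--         if "Traceback" in line:
--             return "\n".join(lines[i:]) + "\n"
--     return ""
-- ===== Notes on version B (the rewrite author's own statement) =====
-- stated objective: simpler
-- what changed: Replaces A's boolean-flag accumulator loop with a locate-then-slice decomposition: find the index of the first line containing 'Traceback', then return '\n'.join(lines[i:]) + '\n' in one shaped operation (or '' if absent).
import Mathlib
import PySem

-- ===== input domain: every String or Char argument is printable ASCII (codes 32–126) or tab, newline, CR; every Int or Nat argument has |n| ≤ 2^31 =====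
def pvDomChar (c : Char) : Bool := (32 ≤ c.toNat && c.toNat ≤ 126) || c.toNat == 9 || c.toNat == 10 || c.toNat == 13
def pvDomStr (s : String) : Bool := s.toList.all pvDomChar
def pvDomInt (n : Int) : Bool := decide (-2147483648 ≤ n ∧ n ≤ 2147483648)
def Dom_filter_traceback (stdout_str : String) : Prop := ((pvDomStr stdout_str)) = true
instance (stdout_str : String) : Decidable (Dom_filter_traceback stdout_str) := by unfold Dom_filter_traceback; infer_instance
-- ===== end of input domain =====

-- B replaces A's boolean-flag accumulator loop with locate-then-slice: find the first
-- line containing "Traceback", then join the tail in one operation (objective: simpler).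

-- ===== PORT A =====
-- A: split on "\n", one pass with a flag, appending line + "\n" once the flag is set.
def filter_traceback (stdout_str : String) : String :=
  let lines := PySem.Chars.splitOn stdout_str.toList ['\n']
  let st := lines.foldl
    (fun (st : List Char × Bool) line =>
      let started := st.2 || PySem.Chars.isIn "Traceback".toList line
      (if started then st.1 ++ line ++ ['\n'] else st.1, started))
    ([], false)
  String.ofList st.1

-- ===== PORT B =====
-- B: index of the first line containing "Traceback"; if found, "\n".join(lines[i:]) + "\n".
def filter_traceback_alt (stdout_str : String) : String :=
  let lines := PySem.Chars.splitOn stdout_str.toList ['\n']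
  match lines.findIdx? (fun line => PySem.Chars.isIn "Traceback".toList line) with
  | none => ""
  | some i => String.ofList (PySem.Chars.join ['\n'] (lines.drop i) ++ ['\n'])

-- ===== PRECONDITION & SPEC =====
def Spec_filter_traceback (stdout_str : String) (out : String) : Prop := out = filter_traceback_alt stdout_str
instance (stdout_str : String) (out : String) : Decidable (Spec_filter_traceback stdout_str out) := by unfold Spec_filter_traceback; infer_instance

-- ===== CLAIM (what is proved, stated in full; the proofs are below) =====
def Claim_equal_filter_traceback : Prop := ∀ (stdout_str : String), Dom_filter_traceback stdout_str → Spec_filter_traceback stdout_str (filter_traceback stdout_str)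

-- ===== LEMMAS AND PROOFS =====

-- after the flag is set, A appends line + '\n' for every remaining line
theorem pv_loop_started (tb : List Char) (ls : List (List Char)) (m : List Char) :
    ls.foldl
      (fun (st : List Char × Bool) line =>
        let started := st.2 || PySem.Chars.isIn tb line
        (if started then st.1 ++ line ++ ['\n'] else st.1, started))
      (m, true)
    = (m ++ ls.flatMap (fun l => l ++ ['\n']), true) := by
  induction ls generalizing m with
  | nil => simp
  | cons l t ih =>
    have h := ih (m ++ l ++ ['\n'])
    simpa using h

-- join with '\n' then a trailing '\n' = per-line append of '\n' (nonempty list)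
theorem pv_join_flat (l : List Char) (t : List (List Char)) :
    PySem.Chars.join ['\n'] (l :: t) ++ ['\n'] = (l :: t).flatMap (fun ln => ln ++ ['\n']) := by
  induction t generalizing l with
  | nil => simp [PySem.Chars.join_singleton]
  | cons l' t' ih =>
    rw [List.flatMap_cons, ← ih l', PySem.Chars.join_cons_cons]
    simp

-- A's whole loop from the unset flag equals locate-then-slice
theorem pv_loop_find (tb : List Char) (ls : List (List Char)) :
    (ls.foldl
      (fun (st : List Char × Bool) line =>
        let started := st.2 || PySem.Chars.isIn tb line
        (if started then st.1 ++ line ++ ['\n'] else st.1, started))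
      ([], false)).1
    = match ls.findIdx? (fun line => PySem.Chars.isIn tb line) with
      | none => []
      | some i => (ls.drop i).flatMap (fun l => l ++ ['\n']) := by
  induction ls with
  | nil => simp
  | cons l t ih =>
    by_cases h : PySem.Chars.isIn tb l = true
    · simp only [List.foldl_cons, h, Bool.false_or, List.nil_append,
        pv_loop_started, List.findIdx?_cons]
      simp [List.flatMap_cons]
    · simp only [Bool.not_eq_true] at h
      simp only [List.foldl_cons, h, Bool.false_or, Bool.false_eq_true, if_false,
        List.findIdx?_cons]
      rw [ih]
      cases hf : t.findIdx? (fun line => PySem.Chars.isIn tb line) with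
      | none => simp
      | some i => simp

-- ===== VERDICT (by name: the statement is the Claim_ definition above) =====
theorem filter_traceback_spec : Claim_equal_filter_traceback := by
  intro s _
  unfold Spec_filter_traceback filter_traceback filter_traceback_alt
  simp only
  rw [pv_loop_find]
  cases hf : (PySem.Chars.splitOn s.toList ['\n']).findIdx?
      (fun line => PySem.Chars.isIn "Traceback".toList line) with
  | none => rfl
  | some i =>
    have hi : i < (PySem.Chars.splitOn s.toList ['\n']).length :=
      (List.findIdx?_eq_some_iff_findIdx_eq.mp hf).1
    obtain ⟨l, t, hd⟩ : ∃ l t, (PySem.Chars.splitOn s.toList ['\n']).drop i = l :: t := by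
      cases hdr : (PySem.Chars.splitOn s.toList ['\n']).drop i with
      | nil => exact absurd (List.drop_eq_nil_iff.mp hdr) (by omega)
      | cons a b => exact ⟨a, b, rfl⟩
    dsimp only
    rw [hd, ← pv_join_flat]
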